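-- pv_equiv track=rewrite | github.com/dariamarc/algo | strong_password.py | get_info
-- ===== SOURCE A (Python) =====
-- def get_info(s):
--     """
--     Get the number of lowercase letters, uppercase letters, digits and groups of reapeating characters of string.
--     :param s:
--     :return: no_lowercase - no of lowercase letters
--              no_uppercase - no of uppercase letters
--              no_digit - no of digits
--              repeats - array of no of repeating groups of characters
--     """
--     no_lowercase = 0  # no of lowercase letters existing in the string
--     no_uppercase = 0  # no of uppercase letters existing in string
--     no_digit = 0  # no of digits existing in string
--
--     r_begin = 0  # beginning index of a repeating sequence
--     r_end = 0  # end of a repeating sequence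
--     repeats = []    # array with the lengths of groups of characters
--
--     for i in range(len(s)):
--         # count the number of lowercase, uppercase and digits present in string
--         if s[i].islower():
--             no_lowercase += 1
--         elif s[i].isupper():
--             no_uppercase += 1
--         elif s[i].isdigit():
--             no_digit += 1
--
--         # compute length of repeating sequence
--         if i < len(s) - 1 and s[i] == s[i + 1]:
--             r_end = i + 1
--         else:
--             repeats.append(r_end - r_begin + 1)
--             r_begin = i + 1
--             r_end = i + 1
--
--     return no_lowercase, no_uppercase, no_digit, repeats
-- ===== SOURCE B (Python) =====
-- from itertools import groupby
--
--
-- def get_info(s):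
--     no_lowercase = sum(1 for c in s if c.islower())
--     no_uppercase = sum(1 for c in s if c.isupper())
--     no_digit = sum(1 for c in s if c.isdigit())
--     repeats = [len(list(g)) for _, g in groupby(s)]
--     return no_lowercase, no_uppercase, no_digit, repeats
-- ===== Notes on version B (the rewrite author's own statement) =====
-- stated objective: idiomatic
-- what changed: Replaces the single combined pass with index/sentinel run bookkeeping by three independent class-counting comprehensions plus itertools.groupby for the run lengths.
import Mathlib
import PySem

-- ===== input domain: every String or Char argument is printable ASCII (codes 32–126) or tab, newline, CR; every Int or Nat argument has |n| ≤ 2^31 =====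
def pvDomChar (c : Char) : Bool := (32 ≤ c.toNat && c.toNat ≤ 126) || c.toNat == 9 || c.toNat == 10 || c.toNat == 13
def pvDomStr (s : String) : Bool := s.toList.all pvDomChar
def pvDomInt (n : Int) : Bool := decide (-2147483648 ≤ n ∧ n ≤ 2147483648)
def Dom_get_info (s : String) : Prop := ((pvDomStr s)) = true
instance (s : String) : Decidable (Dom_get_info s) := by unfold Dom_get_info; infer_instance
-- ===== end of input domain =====

-- B replaces A's combined index/sentinel single pass by three independent class counts
-- plus a groupby-style run-length grouping (objective: idiomatic; not faster).

-- ===== PORT A =====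
-- the single for-loop over range(len(s)) with counters and the r_begin/r_end sentinels
def loopA (l : List Char) (i : Nat) (nl nu nd rb re : Int) (reps : List Int) :
    Int × Int × Int × List Int :=
  if h : i < l.length then
    let c := l[i]
    -- if/elif/elif chain on s[i]
    let nl' := if PySem.Chars.islower c then nl + 1 else nl
    let nu' := if ¬ PySem.Chars.islower c ∧ PySem.Chars.isupper c then nu + 1 else nu
    let nd' := if ¬ PySem.Chars.islower c ∧ ¬ PySem.Chars.isupper c ∧ PySem.Chars.isdigit c
               then nd + 1 else nd
    -- if i < len(s) - 1 and s[i] == s[i + 1]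
    if i < l.length - 1 ∧ l[i+1]? = some c then
      loopA l (i+1) nl' nu' nd' rb ((i : Int) + 1) reps
    else
      loopA l (i+1) nl' nu' nd' ((i : Int) + 1) ((i : Int) + 1) (reps ++ [re - rb + 1])
  else (nl, nu, nd, reps)
termination_by l.length - i

def get_info (s : String) : Int × Int × Int × List Int :=
  loopA s.toList 0 0 0 0 0 0 []

-- ===== PORT B =====
-- hand port of itertools.groupby (groups of consecutive equal elements), step for step
def pyGroupby (l : List Char) : List (List Char) :=
  match l with
  | [] => []
  | c :: cs =>
      (c :: cs.takeWhile (fun d => d == c)) :: pyGroupby (cs.dropWhile (fun d => d == c))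
termination_by l.length
decreasing_by
  simp only [List.length_cons]
  exact Nat.lt_succ_of_le (List.length_dropWhile_le _ _)

def get_info_alt (s : String) : Int × Int × Int × List Int :=
  let l := s.toList
  ((l.countP PySem.Chars.islower : Int),
   (l.countP PySem.Chars.isupper : Int),
   (l.countP PySem.Chars.isdigit : Int),
   (pyGroupby l).map (fun g => (g.length : Int)))

-- ===== PRECONDITION & SPEC =====
def Spec_get_info (s : String) (out : Int × Int × Int × List Int) : Prop := out = get_info_alt s
instance (s : String) (out : Int × Int × Int × List Int) : Decidable (Spec_get_info s out) := by unfold Spec_get_info; infer_instance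

-- ===== CLAIM (what is proved, stated in full; the proofs are below) =====
def Claim_equal_get_info : Prop := ∀ (s : String), Dom_get_info s → Spec_get_info s (get_info s)

-- ===== LEMMAS AND PROOFS =====

-- run lengths with the first (open) run already carrying k earlier characters
def runsK (k : Int) : List Char → List Int
  | [] => []
  | c :: cs =>
      match cs with
      | [] => [k + 1]
      | d :: _ => if d = c then runsK (k + 1) cs else (k + 1) :: runsK 0 cs

lemma runsK_double (k : Int) (c : Char) (t : List Char) :
    runsK k (c :: c :: t) = runsK (k + 1) (c :: t) := by
  rw [runsK, if_pos rfl]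

lemma lower_not_upper (c : Char) (h : PySem.Chars.islower c = true) :
    PySem.Chars.isupper c = false := by
  simp only [PySem.Chars.islower, Bool.and_eq_true, decide_eq_true_eq] at h
  simp only [PySem.Chars.isupper, Bool.and_eq_false_iff, decide_eq_false_iff_not]
  right; intro h4; exact absurd (le_trans h.1 h4) (by decide)

lemma lower_not_digit (c : Char) (h : PySem.Chars.islower c = true) :
    PySem.Chars.isdigit c = false := by
  simp only [PySem.Chars.islower, Bool.and_eq_true, decide_eq_true_eq] at h
  simp only [PySem.Chars.isdigit, Bool.and_eq_false_iff, decide_eq_false_iff_not]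
  right; intro h4; exact absurd (le_trans h.1 h4) (by decide)

lemma upper_not_digit (c : Char) (h : PySem.Chars.isupper c = true) :
    PySem.Chars.isdigit c = false := by
  simp only [PySem.Chars.isupper, Bool.and_eq_true, decide_eq_true_eq] at h
  simp only [PySem.Chars.isdigit, Bool.and_eq_false_iff, decide_eq_false_iff_not]
  right; intro h4; exact absurd (le_trans h.1 h4) (by decide)

lemma counts_step (c : Char) (t : List Char) (nl nu nd : Int) :
    ((if PySem.Chars.islower c then nl + 1 else nl) + (t.countP PySem.Chars.islower : Int) =
        nl + ((c :: t).countP PySem.Chars.islower : Int))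
    ∧ ((if ¬ PySem.Chars.islower c ∧ PySem.Chars.isupper c then nu + 1 else nu) +
        (t.countP PySem.Chars.isupper : Int) = nu + ((c :: t).countP PySem.Chars.isupper : Int))
    ∧ ((if ¬ PySem.Chars.islower c ∧ ¬ PySem.Chars.isupper c ∧ PySem.Chars.isdigit c
        then nd + 1 else nd) + (t.countP PySem.Chars.isdigit : Int) =
        nd + ((c :: t).countP PySem.Chars.isdigit : Int)) := by
  by_cases hl : PySem.Chars.islower c = true
  · simp [hl, lower_not_upper c hl, lower_not_digit c hl]
    ring
  · by_cases hu : PySem.Chars.isupper c = true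
    · simp [hl, hu, upper_not_digit c hu]
      ring
    · by_cases hd : PySem.Chars.isdigit c = true
      · simp [hl, hu, hd]
        ring
      · simp [hl, hu, hd]

lemma loopA_eq (n : Nat) (l : List Char) (i : Nat) (hn : l.length - i = n)
    (hi : i ≤ l.length) (nl nu nd rb : Int) (reps : List Int) :
    loopA l i nl nu nd rb (i : Int) reps =
      (nl + ((l.drop i).countP PySem.Chars.islower : Int),
       nu + ((l.drop i).countP PySem.Chars.isupper : Int),
       nd + ((l.drop i).countP PySem.Chars.isdigit : Int),
       reps ++ runsK ((i : Int) - rb) (l.drop i)) := by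
  induction n generalizing i nl nu nd rb reps with
  | zero =>
    have hle : i = l.length := by omega
    rw [loopA, dif_neg (by omega)]
    subst hle
    simp [runsK]
  | succ n ih =>
    have h : i < l.length := by omega
    have hdrop : l.drop i = l[i] :: l.drop (i + 1) := (List.getElem_cons_drop h).symm
    obtain ⟨h1, h2, h3⟩ := counts_step l[i] (l.drop (i + 1)) nl nu nd
    rw [loopA, dif_pos h]
    by_cases hrep : i < l.length - 1 ∧ l[i+1]? = some l[i]
    · rw [if_pos hrep]
      have hi1 : i + 1 < l.length := by omega
      have heq : l[i+1]'hi1 = l[i] := by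
        have := hrep.2; rw [List.getElem?_eq_getElem hi1] at this; exact Option.some.inj this
      have : ((i : Int) + 1) = ((i + 1 : Nat) : Int) := by push_cast; ring
      rw [this, ih (i + 1) (by omega) (by omega)]
      have hdrop2 : l.drop (i + 1) = l[i+1] :: l.drop (i + 2) :=
        (List.getElem_cons_drop hi1).symm
      rw [hdrop]
      refine Prod.ext (by simpa using h1) (Prod.ext (by simpa using h2)
        (Prod.ext (by simpa using h3) ?_))
      simp only []
      rw [hdrop2, heq, runsK_double]
      congr 2
      push_cast; ring
    · rw [if_neg hrep]
      have : ((i : Int) + 1) = ((i + 1 : Nat) : Int) := by push_cast; ring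
      rw [this, ih (i + 1) (by omega) (by omega)]
      rw [hdrop]
      refine Prod.ext (by simpa using h1) (Prod.ext (by simpa using h2)
        (Prod.ext (by simpa using h3) ?_))
      simp only []
      have hval : runsK ((i : Int) - rb) (l[i] :: l.drop (i + 1)) =
          ((i : Int) - rb + 1) :: runsK 0 (l.drop (i + 1)) := by
        rcases Nat.lt_or_ge (i + 1) l.length with hi1 | hi1
        · have hdrop2 : l.drop (i + 1) = l[i+1] :: l.drop (i + 2) :=
            (List.getElem_cons_drop hi1).symm
          have hne : l[i+1]'hi1 ≠ l[i] := by
            intro hc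
            exact hrep ⟨by omega, by rw [List.getElem?_eq_getElem hi1, hc]⟩
          rw [hdrop2, runsK, if_neg hne, ← hdrop2]
        · have : l.drop (i + 1) = [] := List.drop_eq_nil_of_le hi1
          rw [this]
          simp [runsK]
      rw [hval]
      simp

lemma runsK_cons (cs : List Char) : ∀ (c : Char) (k : Int),
    runsK k (c :: cs) =
      (k + 1 + ((cs.takeWhile (fun d => d == c)).length : Int)) ::
        runsK 0 (cs.dropWhile (fun d => d == c)) := by
  induction cs with
  | nil => intro c k; simp [runsK]
  | cons d rest ih =>
    intro c k
    by_cases hd : d = c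
    · subst hd
      rw [runsK, if_pos rfl, ih d (k + 1)]
      simp [List.takeWhile, List.dropWhile]
      ring
    · have hb : (d == c) = false := by simp [hd]
      rw [runsK, if_neg hd]
      simp [List.takeWhile, List.dropWhile, hb]

lemma runsK_zero_eq (l : List Char) :
    runsK 0 l = (pyGroupby l).map (fun g => (g.length : Int)) := by
  induction l using pyGroupby.induct with
  | case1 => simp [runsK, pyGroupby]
  | case2 c cs ih =>
    rw [runsK_cons, pyGroupby, List.map_cons, ih]
    simp
    ring

-- ===== VERDICT (by name: the statement is the Claim_ definition above) =====
theorem get_info_spec : Claim_equal_get_info := by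
  intro s _
  unfold Spec_get_info get_info get_info_alt
  have h := loopA_eq s.toList.length s.toList 0 (by simp) (by simp) 0 0 0 0 []
  simp only [Nat.cast_zero, List.drop_zero, Int.sub_zero, List.nil_append] at h
  rw [h, runsK_zero_eq]
  simp
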